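-- pv_equiv track=rewrite | github.com/Daidai1031/PROMPT- | rules.py | _simple_overlap
-- ===== SOURCE A (Python) =====
-- from typing import Any, Callable, Dict, List, Optional
--
-- def _simple_overlap(user_tokens: List[str], anchor_keywords: List[str]) -> int:
--     """
--     Count anchor keywords the child hit. Uses prefix matching for
--     plurals/inflections but only on tokens of length ≥ 4 to avoid letting
--     "a", "to", or "is" sweep through everything.
--     """
--     if not anchor_keywords or not user_tokens:
--         return 0
--     uset = set(user_tokens)
--     hits = 0
--     for kw in anchor_keywords:
--         if kw in uset:
--             hits += 1
--             continue
--         if len(kw) < 4: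
--             continue
--         for t in uset:
--             if len(t) < 4:
--                 continue
--             if t.startswith(kw) or kw.startswith(t):
--                 hits += 1
--                 break
--     return hits
-- ===== SOURCE B (Python) =====
-- from typing import List
--
-- def _simple_overlap(user_tokens: List[str], anchor_keywords: List[str]) -> int:
--     """Same count, but the inner scan over all unique tokens is replaced by
--     O(1) set lookups against a precomputed set of prefixes of the long tokens."""
--     if not anchor_keywords or not user_tokens:
--         return 0
--     uset = set(user_tokens)
--     long_tokens = {t for t in uset if len(t) >= 4}
--     token_prefixes = {t[:j] for t in long_tokens for j in range(4, len(t) + 1)}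
--     hits = 0
--     for kw in anchor_keywords:
--         if kw in uset:
--             hits += 1
--         elif len(kw) >= 4 and (kw in token_prefixes
--                                or any(kw[:j] in long_tokens for j in range(4, len(kw)))):
--             hits += 1
--     return hits
-- ===== Notes on version B (the rewrite author's own statement) =====
-- stated objective: faster
-- what changed: The per-keyword inner scan over all unique tokens is removed: B precomputes the set of long tokens and the set of all length>=4 prefixes of long tokens once, then answers each keyword with O(L) set lookups (kw in prefix-set for 'token extends kw', kw's proper prefixes in long-token set for 'token is prefix of kw').
import Mathlib
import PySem

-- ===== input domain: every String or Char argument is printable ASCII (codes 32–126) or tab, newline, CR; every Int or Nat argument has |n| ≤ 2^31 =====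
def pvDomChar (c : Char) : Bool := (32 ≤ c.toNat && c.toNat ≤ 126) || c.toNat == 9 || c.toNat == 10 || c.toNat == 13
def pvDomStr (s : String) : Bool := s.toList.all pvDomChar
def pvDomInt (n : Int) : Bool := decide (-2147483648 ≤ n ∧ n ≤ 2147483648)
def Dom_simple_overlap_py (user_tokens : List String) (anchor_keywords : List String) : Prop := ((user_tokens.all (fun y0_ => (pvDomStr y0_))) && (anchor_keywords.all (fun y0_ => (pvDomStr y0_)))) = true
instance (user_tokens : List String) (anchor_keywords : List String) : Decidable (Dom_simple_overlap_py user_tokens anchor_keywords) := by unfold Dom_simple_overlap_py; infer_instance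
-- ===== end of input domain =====

-- B replaces A's per-keyword scan over all unique tokens by one precomputed set of
-- length-≥4 prefixes of the long tokens plus O(len kw) set lookups per keyword (faster).

-- ===== PORT A =====
-- A's inner 'for t in uset: … hits += 1; break' only ever contributes 0 or 1, a
-- first-hit existence search whose outcome is independent of the set's iteration
-- order, so it is ported as List.any over the Set's element list.
def soMatch (kw t : String) : Bool :=
  if PySem.Str.len t < 4 then false
  else PySem.Str.startswith t kw || PySem.Str.startswith kw t

def simple_overlap_py (user_tokens : List String) (anchor_keywords : List String) : Int :=
  if anchor_keywords = [] ∨ user_tokens = [] then 0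
  else
    let uset : PySem.Set String := PySem.Set.ofList user_tokens
    anchor_keywords.foldl (fun hits kw =>
      if PySem.Set.contains uset kw then hits + 1
      else if PySem.Str.len kw < 4 then hits
      else if List.any uset (soMatch kw) then hits + 1 else hits) 0

-- ===== PORT B =====
-- t[:j] for j in range(4, len(t)+1): all prefixes of t of length ≥ 4
def altPrefixes (t : String) : List String :=
  (PySem.List.pyRange 4 (PySem.Str.len t + 1) 1).map (fun j => PySem.Str.slice t none (some j))

def altHit (uset longToks prefixes : PySem.Set String) (kw : String) : Bool :=
  if PySem.Set.contains uset kw then true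
  else if 4 ≤ PySem.Str.len kw then
    PySem.Set.contains prefixes kw ||
    (PySem.List.pyRange 4 (PySem.Str.len kw) 1).any
      (fun j => PySem.Set.contains longToks (PySem.Str.slice kw none (some j)))
  else false

def simple_overlap_py_alt (user_tokens : List String) (anchor_keywords : List String) : Int :=
  if anchor_keywords = [] ∨ user_tokens = [] then 0
  else
    let uset : PySem.Set String := PySem.Set.ofList user_tokens
    let longToks : PySem.Set String :=
      PySem.Set.ofList (List.filter (fun t => decide (4 ≤ PySem.Str.len t)) uset)
    let prefixes : PySem.Set String := PySem.Set.ofList (List.flatMap altPrefixes longToks)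
    anchor_keywords.foldl (fun hits kw =>
      if altHit uset longToks prefixes kw then hits + 1 else hits) 0

-- ===== PRECONDITION & SPEC =====
def Spec_simple_overlap_py (user_tokens : List String) (anchor_keywords : List String) (out : Int) : Prop := out = simple_overlap_py_alt user_tokens anchor_keywords
instance (user_tokens : List String) (anchor_keywords : List String) (out : Int) : Decidable (Spec_simple_overlap_py user_tokens anchor_keywords out) := by unfold Spec_simple_overlap_py; infer_instance

-- ===== CLAIM (what is proved, stated in full; the proofs are below) =====
def Claim_equal_simple_overlap_py : Prop := ∀ (user_tokens : List String) (anchor_keywords : List String), Dom_simple_overlap_py user_tokens anchor_keywords → Spec_simple_overlap_py user_tokens anchor_keywords (simple_overlap_py user_tokens anchor_keywords)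

-- ===== LEMMAS AND PROOFS =====

theorem soMatch_iff (kw t : String) :
    soMatch kw t = true ↔ 4 ≤ t.toList.length ∧ (kw.toList <+: t.toList ∨ t.toList <+: kw.toList) := by
  unfold soMatch
  rw [PySem.Str.len_eq]
  split_ifs with h
  · simp only [false_iff]; rintro ⟨h4,-⟩; omega
  · simp only [Bool.or_eq_true, PySem.Str.startswith_eq, PySem.Chars.startswith_iff]
    constructor
    · exact fun hx => ⟨by omega, hx⟩
    · exact fun hx => hx.2

theorem slice_toList (s : String) (j : ℤ) (h : 0 ≤ j) :
    (PySem.Str.slice s none (some j)).toList = s.toList.take j.toNat := by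
  rw [PySem.Str.toList_slice, PySem.Chars.slice_eq_listSlice, PySem.List.slice_to _ h]

theorem mem_altPrefixes (t kw : String) :
    kw ∈ altPrefixes t ↔ ∃ j : ℕ, 4 ≤ j ∧ j ≤ t.toList.length ∧ kw.toList = t.toList.take j := by
  unfold altPrefixes
  simp only [List.mem_map, PySem.List.mem_pyRange_one, PySem.Str.len_eq]
  constructor
  · rintro ⟨j, ⟨hj4, hjl⟩, rfl⟩
    refine ⟨j.toNat, by omega, by omega, ?_⟩
    rw [slice_toList _ _ (by omega)]
  · rintro ⟨j, hj4, hjl, hkw⟩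
    refine ⟨(j:ℤ), ⟨by omega, by omega⟩, ?_⟩
    have : (PySem.Str.slice t none (some (j:ℤ))).toList = kw.toList := by
      rw [slice_toList _ _ (by omega)]; simpa using hkw.symm
    exact String.toList_inj.mp this

theorem set_contains_iff (s : PySem.Set String) (x : String) :
    PySem.Set.contains s x = true ↔ x ∈ s := by
  unfold PySem.Set.contains; exact List.contains_iff_mem

theorem core (ut : List String) (kw : String) (hmem : kw ∉ ut) (hlen : 4 ≤ kw.toList.length) :
    (∃ t ∈ ut, soMatch kw t = true) ↔
    ((∃ t, (t ∈ ut ∧ (4:ℤ) ≤ ↑t.toList.length) ∧ kw ∈ altPrefixes t) ∨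
     (∃ j : ℤ, (4 ≤ j ∧ j < (kw.toList.length : ℤ)) ∧
        PySem.Str.slice kw none (some j) ∈ ut ∧
        (4:ℤ) ≤ ↑(PySem.Str.slice kw none (some j)).toList.length)) := by
  constructor
  · rintro ⟨t, ht, hm⟩
    rw [soMatch_iff] at hm
    obtain ⟨ht4, hpre | hpre⟩ := hm
    · left
      exact ⟨t, ⟨ht, by omega⟩, (mem_altPrefixes t kw).mpr
        ⟨kw.toList.length, hlen, hpre.length_le, List.prefix_iff_eq_take.mp hpre⟩⟩
    · right
      have hne : t ≠ kw := fun h => hmem (h ▸ ht)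
      have hle := hpre.length_le
      have hlt : t.toList.length < kw.toList.length := by
        rcases Nat.lt_or_ge t.toList.length kw.toList.length with h | h
        · exact h
        · exact absurd (String.toList_inj.mp (hpre.eq_of_length (by omega))) hne
      have hs : PySem.Str.slice kw none (some (t.toList.length : ℤ)) = t := by
        apply String.toList_inj.mp
        rw [slice_toList _ _ (by omega)]
        simp only [Int.toNat_natCast]
        exact (List.prefix_iff_eq_take.mp hpre).symm
      exact ⟨(t.toList.length : ℤ), ⟨by omega, by omega⟩, by rw [hs]; exact ht,
        by rw [hs]; exact_mod_cast ht4⟩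
  · rintro (⟨t, ⟨ht, ht4⟩, hp⟩ | ⟨j, ⟨hj4, hjl⟩, hs, hs4⟩)
    · obtain ⟨j, hj4, hjl, hkw⟩ := (mem_altPrefixes t kw).mp hp
      refine ⟨t, ht, (soMatch_iff kw t).mpr ⟨by omega, Or.inl ?_⟩⟩
      rw [hkw]; exact List.take_prefix j t.toList
    · refine ⟨_, hs, (soMatch_iff _ _).mpr ⟨by omega, Or.inr ?_⟩⟩
      rw [slice_toList _ _ (by omega)]
      exact List.take_prefix _ _

theorem hit_eq (ut : List String) (kw : String) :
    (if PySem.Set.contains (PySem.Set.ofList ut) kw then (1 : Int)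
     else if PySem.Str.len kw < 4 then 0
     else if List.any (PySem.Set.ofList ut) (soMatch kw) then 1 else 0)
    = (if altHit (PySem.Set.ofList ut)
          (PySem.Set.ofList (List.filter (fun t => decide (4 ≤ PySem.Str.len t)) (PySem.Set.ofList ut)))
          (PySem.Set.ofList (List.flatMap altPrefixes
            (PySem.Set.ofList (List.filter (fun t => decide (4 ≤ PySem.Str.len t)) (PySem.Set.ofList ut)))))
          kw then (1 : Int) else 0) := by
  by_cases hmem : kw ∈ ut
  · have hc : PySem.Set.contains (PySem.Set.ofList ut) kw = true :=
      (set_contains_iff _ _).mpr ((PySem.Set.mem_ofList ut kw).mpr hmem)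
    unfold altHit
    rw [if_pos hc, if_pos hc, if_pos rfl]
  · have hc : ¬ PySem.Set.contains (PySem.Set.ofList ut) kw = true := fun h =>
      hmem ((PySem.Set.mem_ofList ut kw).mp ((set_contains_iff _ _).mp h))
    unfold altHit
    rw [if_neg hc, if_neg hc, PySem.Str.len_eq]
    by_cases hl : 4 ≤ kw.toList.length
    · rw [if_neg (show ¬ ((kw.toList.length:ℤ) < 4) by omega),
          if_pos (show (4:ℤ) ≤ ↑kw.toList.length by exact_mod_cast hl)]
      have hA : List.any (PySem.Set.ofList ut) (soMatch kw) = true ↔ ∃ t ∈ ut, soMatch kw t = true := by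
        simp only [List.any_eq_true]
        constructor
        · rintro ⟨t, ht, h⟩; exact ⟨t, (PySem.Set.mem_ofList ut t).mp ht, h⟩
        · rintro ⟨t, ht, h⟩; exact ⟨t, (PySem.Set.mem_ofList ut t).mpr ht, h⟩
      have hB : ((PySem.Set.contains (PySem.Set.ofList (List.flatMap altPrefixes
            (PySem.Set.ofList (List.filter (fun t => decide (4 ≤ PySem.Str.len t)) (PySem.Set.ofList ut))))) kw ||
          (PySem.List.pyRange 4 ((kw.toList.length : ℤ)) 1).any
            (fun j => PySem.Set.contains (PySem.Set.ofList (List.filter (fun t => decide (4 ≤ PySem.Str.len t)) (PySem.Set.ofList ut)))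
              (PySem.Str.slice kw none (some j)))) = true) ↔
          ((∃ t, (t ∈ ut ∧ (4:ℤ) ≤ ↑t.toList.length) ∧ kw ∈ altPrefixes t) ∨
           (∃ j : ℤ, (4 ≤ j ∧ j < (kw.toList.length : ℤ)) ∧
              PySem.Str.slice kw none (some j) ∈ ut ∧
              (4:ℤ) ≤ ↑(PySem.Str.slice kw none (some j)).toList.length)) := by
        simp only [Bool.or_eq_true, List.any_eq_true, set_contains_iff, PySem.Set.mem_ofList,
          List.mem_flatMap, List.mem_filter, PySem.List.mem_pyRange_one, PySem.Str.len_eq,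
          decide_eq_true_eq]
      have hiff := hA.trans ((core ut kw hmem hl).trans hB.symm)
      split_ifs with h1 h2 h3
      · rfl
      · exact absurd (hiff.mp h1) h2
      · exact absurd (hiff.mpr h3) h1
      · rfl
    · rw [if_pos (show (kw.toList.length:ℤ) < 4 by omega),
          if_neg (show ¬ ((4:ℤ) ≤ ↑kw.toList.length) by omega),
          if_neg (show ¬ (false = true) by decide)]

-- ===== VERDICT (by name: the statement is the Claim_ definition above) =====
theorem simple_overlap_py_spec : Claim_equal_simple_overlap_py := by
  intro ut ak _
  unfold Spec_simple_overlap_py simple_overlap_py simple_overlap_py_alt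
  by_cases h : ak = [] ∨ ut = []
  · simp [h]
  · simp only [h, if_false]
    congr 1
    funext hits kw
    have := hit_eq ut kw
    simp only [altHit] at this ⊢
    split_ifs at this ⊢ <;> omega
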